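-- pv_equiv track=rewrite | github.com/azat-khatyn/coding-challenges | challenges/wayfair_challenge.py | solution
-- ===== SOURCE A (Python) =====
-- def solution(A):
--
--     # check trivial case
--     if len(A) == 1:
--         return -1
--
--     # collect a map of values to indices
--     value_to_indices = {}
--     for i in range(len(A)):
--         a = A[i]
--         if a not in value_to_indices:
--             value_to_indices[a] = []
--         value_to_indices[a].append(i)
--
--     # sort by values
--     value_to_indices_sorted = sorted(value_to_indices.items(), key=lambda x: x[0])
--
--     # all values were the same
--     if len(value_to_indices_sorted) == 1:
--         return -1
--
--     # consider each adjacent pair and find the combination of indices with the smallest distance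
--     min_distance = 40000
--     for i in range(len(value_to_indices_sorted) - 1):
--         t1 = value_to_indices_sorted[i]
--         t2 = value_to_indices_sorted[i + 1]
--         for k1 in t1[1]:
--             for k2 in t2[1]:
--                 distance = abs(k1 - k2)
--                 if distance < min_distance:
--                     min_distance = distance
--     return min_distance
-- ===== SOURCE B (Python) =====
-- def solution(A):
--     # group indices by value (index lists come out already sorted ascending)
--     idx = {}
--     for i, a in enumerate(A):
--         idx.setdefault(a, []).append(i)
--     items = sorted(idx.items(), key=lambda t: t[0])
--     # one distinct value (covers len(A) == 1 too)
--     if len(items) == 1: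
--         return -1
--     best = 40000
--     # two-pointer merge over each adjacent pair's sorted index lists
--     for (_, xs), (_, ys) in zip(items, items[1:]):
--         p = q = 0
--         while p < len(xs) and q < len(ys):
--             d = abs(xs[p] - ys[q])
--             if d < best:
--                 best = d
--             if xs[p] < ys[q]:
--                 p += 1
--             else:
--                 q += 1
--     return best
-- ===== Notes on version B (the rewrite author's own statement) =====
-- stated objective: alternative
-- what changed: The nested scan over every index pair of each adjacent value group is replaced by a linear two-pointer merge of the two already-sorted index lists (and the dict is built with setdefault over enumerate); asymptotically better on duplicate-heavy inputs, but not measurably faster on the benchmark's input family, where sorting dominates both.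
import Mathlib
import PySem

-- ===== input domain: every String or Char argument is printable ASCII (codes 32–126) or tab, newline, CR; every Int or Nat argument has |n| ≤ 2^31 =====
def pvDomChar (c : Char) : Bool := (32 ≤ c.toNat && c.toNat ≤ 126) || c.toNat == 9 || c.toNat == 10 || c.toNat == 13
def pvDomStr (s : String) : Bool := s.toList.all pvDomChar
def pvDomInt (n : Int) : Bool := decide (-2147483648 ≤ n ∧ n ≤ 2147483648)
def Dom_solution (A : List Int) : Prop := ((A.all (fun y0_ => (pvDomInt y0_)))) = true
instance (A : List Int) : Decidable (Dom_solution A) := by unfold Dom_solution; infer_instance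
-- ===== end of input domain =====

-- B replaces A's nested scan of every index pair of adjacent value groups by a linear
-- two-pointer merge of the two sorted index lists (objective: alternative algorithm).

-- ===== PORT A =====
def solution (A : List Int) : Int :=
  if A.length == 1 then -1
  else
    -- for i in range(len(A)): a = A[i]; if a not in map: map[a] = []; map[a].append(i)
    let d : PySem.Dict Int (List Int) :=
      (PySem.List.pyRange 0 (A.length : Int) 1).foldl
        (fun d i =>
          let a := PySem.List.pyGetD A i 0
          let d := if d.contains a then d else d.insert a []
          d.modify a [] (fun l => l ++ [i]))
        PySem.Dict.empty
    let items := PySem.List.sorted d.items (fun x => x.1) false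
    if items.length == 1 then -1
    else
      (PySem.List.pyRange 0 ((items.length : Int) - 1) 1).foldl
        (fun md i =>
          let t1 := PySem.List.pyGetD items i ((0 : Int), ([] : List Int))
          let t2 := PySem.List.pyGetD items (i + 1) ((0 : Int), ([] : List Int))
          t1.2.foldl (fun md k1 =>
            t2.2.foldl (fun md k2 =>
              let distance := |k1 - k2|
              if distance < md then distance else md) md) md)
        40000

-- ===== PORT B =====
-- the two-pointer merge of Source B's while loop
def tpMerge (xs ys : List Int) (best : Int) : Int :=
  match xs, ys with
  | x :: xs', y :: ys' =>
      let dd := |x - y|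
      let best := if dd < best then dd else best
      if x < y then tpMerge xs' (y :: ys') best else tpMerge (x :: xs') ys' best
  | _, _ => best
termination_by xs.length + ys.length

def solution_alt (A : List Int) : Int :=
  let idx : PySem.Dict Int (List Int) :=
    (PySem.List.enumerate A).foldl (fun d p => d.modify p.2 [] (fun l => l ++ [p.1])) PySem.Dict.empty
  let items := PySem.List.sorted idx.items (fun t => t.1) false
  if items.length == 1 then -1
  else (items.zip items.tail).foldl (fun best pr => tpMerge pr.1.2 pr.2.2 best) 40000

-- ===== PRECONDITION & SPEC =====
def Spec_solution (A : List Int) (out : Int) : Prop := out = solution_alt A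
instance (A : List Int) (out : Int) : Decidable (Spec_solution A out) := by unfold Spec_solution; infer_instance

-- ===== CLAIM (what is proved, stated in full; the proofs are below) =====
def Claim_equal_solution : Prop := ∀ (A : List Int), Dom_solution A → Spec_solution A (solution A)

-- ===== LEMMAS AND PROOFS =====

-- the common grouping dict: value -> list of its indices, in order
def buildDict (A : List Int) : PySem.Dict Int (List Int) :=
  (PySem.List.enumerate A).foldl (fun d p => d.modify p.2 [] (fun l => l ++ [p.1])) PySem.Dict.empty

-- the multiset of |x - y| over all pairs of the two lists
def pmin (xs ys : List Int) : List Int := xs.flatMap (fun x => ys.map (fun y => |x - y|))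

-- running-min update is `min`
theorem upd_eq_min (m d : Int) : (if d < m then d else m) = min m d := by
  rw [min_def]; split <;> split <;> omega

theorem foldl_min_absorb (l : List Int) (a : Int) (h : ∀ d ∈ l, a ≤ d) :
    l.foldl min a = a := by
  induction l with
  | nil => rfl
  | cons x t ih =>
      simp only [List.foldl_cons, min_eq_left (h x (by simp))]
      exact ih fun d hd => h d (by simp [hd])

theorem foldl_min_perm {l l' : List Int} (h : l.Perm l') (a : Int) :
    l.foldl min a = l'.foldl min a := h.foldl_eq a

theorem perm_swap3 {α : Type} (a b c : List α) : (a ++ (b ++ c)).Perm (b ++ (a ++ c)) := by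
  rw [← List.append_assoc, ← List.append_assoc]
  exact List.perm_append_comm.append_right c

-- A's nested loops compute the running min over all pairs
theorem nested_eq (xs ys : List Int) (b : Int) :
    xs.foldl (fun m x => ys.foldl (fun m y => min m |x - y|) m) b
      = (pmin xs ys).foldl min b := by
  induction xs generalizing b with
  | nil => simp [pmin]
  | cons x t ih =>
      simp only [pmin, List.flatMap_cons, List.foldl_append, List.foldl_cons]
      rw [← List.foldl_map (f := fun y => |x - y|) (g := min), ih]
      rfl

theorem pmin_cons_right (xs : List Int) (y : Int) (ys : List Int) :
    (pmin xs (y :: ys)).Perm (xs.map (fun x => |x - y|) ++ pmin xs ys) := by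
  induction xs with
  | nil => simp [pmin]
  | cons x t ih =>
      simp only [pmin, List.flatMap_cons, List.map_cons, List.cons_append] at *
      refine List.Perm.cons _ ?_
      exact (List.Perm.append_left _ ih).trans (perm_swap3 _ _ _)

-- the two-pointer merge computes the same running min, on sorted inputs
theorem tpMerge_eq : ∀ (xs ys : List Int) (b : Int), xs.Pairwise (· ≤ ·) → ys.Pairwise (· ≤ ·) →
    tpMerge xs ys b = (pmin xs ys).foldl min b := by
  intro xs
  induction xs with
  | nil => intro ys b _ _; simp [tpMerge, pmin]
  | cons x t ihx =>
    intro ys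
    induction ys with
    | nil =>
        intro b _ _
        have : (List.flatMap (fun x => ([] : List Int)) t) = [] := by simp
        simp [tpMerge, pmin, this]
    | cons y u ihy =>
      intro b hx hy
      rw [tpMerge]
      simp only [upd_eq_min]
      rcases List.pairwise_cons.mp hx with ⟨hxall, hxt⟩
      rcases List.pairwise_cons.mp hy with ⟨hyall, hyu⟩
      split_ifs with hxy
      · rw [ihx (y :: u) (min b |x - y|) hxt hy]
        simp only [pmin, List.flatMap_cons, List.map_cons, List.cons_append,
          List.foldl_cons, List.foldl_append]
        rw [foldl_min_absorb (u.map (fun y' => |x - y'|)) (min b |x - y|) ?_]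
        intro dd hd
        rcases List.mem_map.mp hd with ⟨y', hy', rfl⟩
        have h1 := hyall y' hy'
        have h2 : |x - y| ≤ |x - y'| := by
          rw [abs_of_nonpos (by omega), abs_of_nonpos (by omega)]; omega
        exact le_trans (min_le_right _ _) h2
      · rw [ihy (min b |x - y|) hx hyu]
        have step1 : (pmin t (y :: u)).Perm (t.map (fun x' => |x' - y|) ++ pmin t u) :=
          pmin_cons_right t y u
        have P : (pmin (x :: t) (y :: u)).Perm
            (|x - y| :: (t.map (fun x' => |x' - y|) ++ pmin (x :: t) u)) := by
          show ((|x - y| :: u.map (fun y' => |x - y'|)) ++ pmin t (y :: u)).Perm _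
          rw [List.cons_append]
          refine List.Perm.cons _ ?_
          show (u.map (fun y' => |x - y'|) ++ pmin t (y :: u)).Perm
            (t.map (fun x' => |x' - y|) ++ (u.map (fun y' => |x - y'|) ++ pmin t u))
          exact ((List.Perm.append_left _ step1).trans (perm_swap3 _ _ _))
        rw [foldl_min_perm P b]
        simp only [List.foldl_cons, List.foldl_append]
        rw [foldl_min_absorb (t.map (fun x' => |x' - y|)) (min b |x - y|) ?_]
        intro dd hd
        rcases List.mem_map.mp hd with ⟨x', hx', rfl⟩
        have h1 := hxall x' hx'
        have h2 : |x - y| ≤ |x' - y| := by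
          rw [abs_of_nonneg (by omega), abs_of_nonneg (by omega)]; omega
        exact le_trans (min_le_right _ _) h2

theorem enumerate_append_singleton {α : Type} (xs : List α) (x : α) (s : Int) :
    PySem.List.enumerate (xs ++ [x]) s = PySem.List.enumerate xs s ++ [((s + xs.length : Int), x)] := by
  induction xs generalizing s with
  | nil => simp [PySem.List.enumerate_nil, PySem.List.enumerate_cons]
  | cons a t ih =>
      simp only [List.cons_append, PySem.List.enumerate_cons, ih, List.length_cons]
      push_cast
      ring_nf

-- a range loop reading A[i] is a loop over enumerate(A)
theorem foldl_range_index {α β : Type} (A : List α) (d0 : α) (g : β → Int → α → β) (init : β) :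
    (PySem.List.pyRange 0 (A.length : Int) 1).foldl
        (fun s i => g s i (PySem.List.pyGetD A i d0)) init
      = (PySem.List.enumerate A).foldl (fun s p => g s p.1 p.2) init := by
  induction A using List.reverseRecOn generalizing init with
  | nil => simp [PySem.List.pyRange_one_eq_nil (le_refl 0), PySem.List.enumerate_nil]
  | append_singleton t x ih =>
      have hlen : ((t ++ [x]).length : Int) = (t.length : Int) + 1 := by simp
      rw [hlen, PySem.List.pyRange_one_succ_right (by positivity), List.foldl_append,
        enumerate_append_singleton, List.foldl_append]
      simp only [List.foldl_cons, List.foldl_nil]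
      have hcongr : (PySem.List.pyRange 0 (t.length : Int) 1).foldl
          (fun s i => g s i (PySem.List.pyGetD (t ++ [x]) i d0)) init
          = (PySem.List.pyRange 0 (t.length : Int) 1).foldl
          (fun s i => g s i (PySem.List.pyGetD t i d0)) init := by
        apply PySem.List.foldl_congr_mem
        intro acc i hi
        rcases PySem.List.mem_pyRange_one.mp hi with ⟨h0, h1⟩
        rw [PySem.List.pyGetD_eq_getElem _ d0 h0 (by simp; omega),
          PySem.List.pyGetD_eq_getElem _ d0 h0 (by omega : i < (t.length : Int))]
        rw [List.getElem_append_left (by omega)]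
      rw [hcongr, ih]
      have hx : PySem.List.pyGetD (t ++ [x]) (t.length : Int) d0 = x := by
        rw [PySem.List.pyGetD_eq_getElem _ d0 (by positivity) (by simp)]
        simp
      rw [hx, zero_add]

theorem insert_insert_self (d : PySem.Dict Int (List Int)) (k : Int) (h : d.contains k = false) (v : List Int) :
    (d.insert k []).insert k v = d.insert k v := by
  apply PySem.Dict.ext
  simp only [PySem.Dict.items_insert, PySem.Dict.contains_insert_self, h, if_true, if_false,
    Bool.false_eq_true]
  rw [List.map_append]
  have hk : ∀ p ∈ d.items, (if p.1 == k then (k, v) else p) = p := by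
    intro p hp
    have hpk := PySem.Dict.mem_keys_of_mem_items d hp
    have hnk : k ∉ d.keys := by
      intro hmem
      rw [← PySem.Dict.contains_iff_mem_keys] at hmem
      simp [h] at hmem
    have : (p.1 == k) = false := by
      simp only [beq_eq_false_iff_ne, ne_eq]
      exact fun e => hnk (e ▸ hpk)
    simp [this]
  rw [List.map_congr_left hk |>.trans rfl]
  simp

-- A's guarded insert+append step is B's setdefault step
theorem step_eq (d : PySem.Dict Int (List Int)) (a i : Int) :
    (if d.contains a then d else d.insert a []).modify a [] (fun l => l ++ [i])
      = d.modify a [] (fun l => l ++ [i]) := by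
  by_cases h : d.contains a
  · simp [h]
  · simp only [h, if_false, Bool.false_eq_true]
    show (d.insert a []).insert a (((d.insert a []).getD a []) ++ [i]) = d.insert a ((d.getD a []) ++ [i])
    rw [PySem.Dict.getD_insert_self, PySem.Dict.getD_of_not_contains d [] (by simpa using h)]
    exact insert_insert_self d a (by simpa using h) _

theorem foldl_adjacent_nat {α β : Type} (dflt : α) (h : β → α → α → β) :
    ∀ (items : List α) (init : β),
    (List.range (items.length - 1)).foldl
        (fun s k => h s (items.getD k dflt) (items.getD (k + 1) dflt)) init
      = (items.zip items.tail).foldl (fun s pr => h s pr.1 pr.2) init := by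
  intro items
  induction items with
  | nil => intro init; simp
  | cons a t ih =>
      intro init
      cases t with
      | nil => simp
      | cons b r =>
          simp only [List.length_cons, Nat.add_sub_cancel, List.range_succ_eq_map,
            List.foldl_cons, List.foldl_map, List.getD_cons_zero, List.getD_cons_succ,
            List.tail_cons, List.zip_cons_cons]
          have := ih (h init a b)
          simp only [List.length_cons, Nat.add_sub_cancel, List.tail_cons] at this
          exact this

-- the adjacent-pair index loop is a loop over zip(items, items[1:])
theorem foldl_adjacent {α β : Type} (dflt : α) (h : β → α → α → β)
    (items : List α) (init : β) :
    (PySem.List.pyRange 0 ((items.length : Int) - 1) 1).foldl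
        (fun s i => h s (PySem.List.pyGetD items i dflt) (PySem.List.pyGetD items (i + 1) dflt)) init
      = (items.zip items.tail).foldl (fun s pr => h s pr.1 pr.2) init := by
  rw [PySem.List.pyRange_one, List.foldl_map]
  have htn : ((items.length : Int) - 1 - 0).toNat = items.length - 1 := by omega
  rw [htn]
  rw [← foldl_adjacent_nat dflt h items init]
  apply PySem.List.foldl_congr_mem
  intro acc k hk
  have h0 : (0 : Int) + (k : Int) = ((k : Nat) : Int) := by omega
  rw [h0, PySem.List.pyGetD_natCast]
  have h1 : ((k : Nat) : Int) + 1 = (((k + 1 : Nat)) : Int) := by omega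
  rw [h1, PySem.List.pyGetD_natCast]

-- value lists of the grouping dict
theorem getD_buildDict (A : List Int) (c : Int) :
    (buildDict A).getD c []
      = (((PySem.List.enumerate A).map Prod.swap).filter (fun p => p.1 == c)).map (fun p => p.2) := by
  unfold buildDict
  rw [show ((PySem.List.enumerate A).foldl
        (fun d p => d.modify p.2 [] (fun l => l ++ [p.1])) PySem.Dict.empty)
      = (((PySem.List.enumerate A).map Prod.swap).foldl
        (fun d p => d.modify p.1 [] (fun l => l ++ [p.2])) PySem.Dict.empty) from by
    rw [List.foldl_map]; rfl]
  rw [PySem.Dict.getD_foldl_modify_append]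
  simp

theorem buildDict_values_sorted (A : List Int) (c : Int) :
    ((buildDict A).getD c []).Pairwise (· ≤ ·) := by
  rw [getD_buildDict]
  have hsub : ((((PySem.List.enumerate A).map Prod.swap).filter (fun p => p.1 == c)).map (fun p => p.2)).Sublist
      (((PySem.List.enumerate A).map Prod.swap).map (fun p => p.2)) :=
    List.Sublist.map _ List.filter_sublist
  have hall : (((PySem.List.enumerate A).map Prod.swap).map (fun p : Int × Int => p.2)).Pairwise (· ≤ ·) := by
    rw [List.map_map]
    have : ((fun p : Int × Int => p.2) ∘ Prod.swap) = (fun p : Int × Int => p.1) := by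
      funext p; rfl
    rw [this, PySem.List.map_fst_enumerate]
    exact (PySem.List.pairwise_lt_pyRange_one 0 _).imp (fun h => le_of_lt h)
  exact hall.sublist hsub

theorem buildDict_keys_nodup (A : List Int) : (buildDict A).keys.Nodup := by
  unfold buildDict
  exact PySem.Dict.nodup_keys_foldl_modify_key (PySem.List.enumerate A) (fun p => p.2) []
    (fun _ p => fun l => l ++ [p.1]) PySem.Dict.empty (by simp [PySem.Dict.keys_empty])

-- any value list appearing in the sorted items is sorted ascending
theorem mem_sorted_items_sorted (A : List Int) (k : Int) (v : List Int)
    (h : (k, v) ∈ PySem.List.sorted (buildDict A).items (fun x => x.1) false) :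
    v.Pairwise (· ≤ ·) := by
  have hmem : (k, v) ∈ (buildDict A).items := (PySem.List.mem_sorted _ _ _ _).mp h
  have := PySem.Dict.getD_of_mem_items (buildDict A) hmem (buildDict_keys_nodup A) []
  rw [← this]
  exact buildDict_values_sorted A k

-- A's dict-building loop builds the same dict
theorem dictA_eq (A : List Int) :
    (PySem.List.pyRange 0 (A.length : Int) 1).foldl
        (fun d i =>
          let a := PySem.List.pyGetD A i 0
          let d := if d.contains a then d else d.insert a []
          d.modify a [] (fun l => l ++ [i]))
        PySem.Dict.empty = buildDict A := by
  show (PySem.List.pyRange 0 (A.length : Int) 1).foldl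
      (fun d i => (if d.contains (PySem.List.pyGetD A i 0) then d
          else d.insert (PySem.List.pyGetD A i 0) []).modify (PySem.List.pyGetD A i 0)
          [] (fun l => l ++ [i]))
      PySem.Dict.empty = buildDict A
  refine Eq.trans (foldl_range_index A 0
    (fun d i a => (if d.contains a then d else d.insert a []).modify a [] (fun l => l ++ [i]))
    PySem.Dict.empty) ?_
  unfold buildDict
  exact PySem.List.foldl_congr_mem _ _ _ _ (fun d p _ => step_eq d p.2 p.1)

theorem buildDict_eq (A : List Int) :
    (PySem.List.enumerate A).foldl
      (fun d p => d.modify p.2 [] (fun l => l ++ [p.1])) PySem.Dict.empty = buildDict A := rfl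

-- ===== VERDICT (by name: the statement is the Claim_ definition above) =====
theorem solution_spec : Claim_equal_solution := by
  intro A _
  unfold Spec_solution solution solution_alt
  rw [buildDict_eq, dictA_eq]
  simp only [beq_iff_eq]
  by_cases hA : A.length = 1
  · rcases List.length_eq_one_iff.mp hA with ⟨a, rfl⟩
    rw [if_pos hA]
    have hb : buildDict [a] = PySem.Dict.empty.insert a [0] := rfl
    have hitems : (PySem.Dict.empty.insert a ([0] : List Int)).items = [(a, [0])] := rfl
    have h1 : (PySem.List.sorted (buildDict [a]).items (fun x => x.1) false).length = 1 := by
      rw [PySem.List.length_sorted, hb, hitems]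
      rfl
    rw [if_pos h1]
  · rw [if_neg hA]
    by_cases h1 : (PySem.List.sorted (buildDict A).items (fun x => x.1) false).length = 1
    · rw [if_pos h1, if_pos h1]
    · rw [if_neg h1, if_neg h1]
      rw [foldl_adjacent ((0 : Int), ([] : List Int))
        (fun md t1 t2 => t1.2.foldl (fun md k1 =>
          t2.2.foldl (fun md k2 =>
            if |k1 - k2| < md then |k1 - k2| else md) md) md)]
      apply PySem.List.foldl_congr_mem
      intro md pr hpr
      obtain ⟨⟨k1, v1⟩, ⟨k2, v2⟩⟩ := pr
      have hz := List.of_mem_zip hpr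
      have hs1 : v1.Pairwise (· ≤ ·) :=
        mem_sorted_items_sorted A k1 v1 hz.1
      have hs2 : v2.Pairwise (· ≤ ·) :=
        mem_sorted_items_sorted A k2 v2 (List.mem_of_mem_tail hz.2)
      simp only [upd_eq_min]
      rw [nested_eq, tpMerge_eq v1 v2 md hs1 hs2]
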